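-- pv_equiv track=rewrite | github.com/DucHai972/Q_Benchmark | generate_healthcare_answer_lookup_qa.py | decode_mcq_answer
-- ===== SOURCE A (Python) =====
-- def decode_mcq_answer(feature, coded_answer, questions_schema):
--     """Decode MCQ answer from letter code to human-readable text."""
--     question_text = questions_schema[feature]
--
--     if '[MCQ:' not in question_text:
--         # Not an MCQ, return as-is
--         return coded_answer
--
--     # Extract MCQ options
--     mcq_part = question_text.split('[MCQ:')[1].split(']')[0]
--     options = {}
--
--     # Parse options like "A. Female B. Male"
--     parts = mcq_part.strip().split()
--     current_key = None
--     current_value = []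
--
--     for part in parts:
--         if len(part) == 2 and part[1] == '.':
--             # This is a key like "A."
--             if current_key:
--                 options[current_key] = ' '.join(current_value)
--             current_key = part[0]
--             current_value = []
--         else:
--             current_value.append(part)
--
--     # Add the last option
--     if current_key:
--         options[current_key] = ' '.join(current_value)
--
--     return options.get(coded_answer, coded_answer)
-- ===== SOURCE B (Python) =====
-- def decode_mcq_answer(feature, coded_answer, questions_schema):
--     """Decode MCQ answer from letter code to human-readable text."""
--     question_text = questions_schema[feature]
--
--     if '[MCQ:' not in question_text:
--         # Not an MCQ, return as-is
--         return coded_answer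
--
--     mcq_part = question_text.split('[MCQ:')[1].split(']')[0]
--     tokens = mcq_part.strip().split()
--
--     # Scan segment by segment: a key token ("A.") followed by its value
--     # tokens; the last segment whose key matches wins (dict overwrite order).
--     result = coded_answer
--     while tokens:
--         t, tokens = tokens[0], tokens[1:]
--         if len(t) == 2 and t[1] == '.':
--             value = []
--             while tokens and not (len(tokens[0]) == 2 and tokens[0][1] == '.'):
--                 value.append(tokens[0])
--                 tokens = tokens[1:]
--             if t[0] == coded_answer:
--                 result = ' '.join(value)
--     return result
-- ===== Notes on version B (the rewrite author's own statement) =====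
-- stated objective: alternative
-- what changed: Replaces A's dict-building token loop (accumulator state: options dict, current_key, current_value, final flush and .get) with a direct segment scan that pairs each key token with the value tokens up to the next key and overwrites the result on a key match, so no dictionary and no flush step exist.
import Mathlib
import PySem

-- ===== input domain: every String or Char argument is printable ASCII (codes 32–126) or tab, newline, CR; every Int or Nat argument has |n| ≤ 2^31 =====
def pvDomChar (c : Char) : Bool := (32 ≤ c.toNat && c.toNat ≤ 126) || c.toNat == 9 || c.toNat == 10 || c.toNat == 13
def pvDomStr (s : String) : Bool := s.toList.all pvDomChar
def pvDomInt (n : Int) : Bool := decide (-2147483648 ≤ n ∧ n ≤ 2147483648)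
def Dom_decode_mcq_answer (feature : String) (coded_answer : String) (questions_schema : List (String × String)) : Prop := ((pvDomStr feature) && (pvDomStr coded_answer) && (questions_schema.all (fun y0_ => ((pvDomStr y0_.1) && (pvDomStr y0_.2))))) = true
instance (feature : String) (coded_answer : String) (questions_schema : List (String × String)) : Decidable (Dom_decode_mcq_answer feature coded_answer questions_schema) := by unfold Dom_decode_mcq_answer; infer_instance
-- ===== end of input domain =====

-- B replaces A's dict-building loop with a direct segment scan (no dict, no flush); objective: alternative decomposition, same cost.

-- ===== PORT A =====
-- "len(part) == 2 and part[1] == '.'" (shared by both ports as the same Python test)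
def pvIsKeyTok (t : String) : Bool :=
  PySem.Str.len t == 2 && PySem.Str.pyGet? t 1 == some '.'

-- part[0] as a one-character Python string (callers only use it when len(part) = 2)
def pvFirstCharStr (t : String) : String :=
  match PySem.Str.pyGet? t 0 with
  | some c => String.ofList [c]
  | none => ""

-- flush: "if current_key: options[current_key] = ' '.join(current_value)" (current_key is never the empty string)
def pvFlushA (d : PySem.Dict String String) (ck : Option String) (cv : List String) : PySem.Dict String String :=
  match ck with
  | some k => d.insert k (PySem.Str.join " " cv)
  | none => d

-- one iteration of A's for-loop over parts
def pvStepA (st : PySem.Dict String String × Option String × List String) (part : String) :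
    PySem.Dict String String × Option String × List String :=
  if pvIsKeyTok part then
    (pvFlushA st.1 st.2.1 st.2.2, some (pvFirstCharStr part), [])
  else
    (st.1, st.2.1, st.2.2 ++ [part])

-- questions_schema[feature]; "" only outside Pre_ (Python raises KeyError there)
def pvQText (feature : String) (questions_schema : List (String × String)) : String :=
  (PySem.Dict.mk questions_schema).getD feature ""

-- question_text.split('[MCQ:')[1].split(']')[0] (the [1] exists under the guard; getD only for totality)
def pvMcqPart (question_text : String) : String :=
  (((PySem.Str.split? (((PySem.Str.split? question_text "[MCQ:").getD []).getD 1 "") "]").getD []).getD 0 "")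

def decode_mcq_answer (feature : String) (coded_answer : String) (questions_schema : List (String × String)) : String :=
  let question_text := pvQText feature questions_schema
  if PySem.Str.isIn "[MCQ:" question_text = false then
    coded_answer
  else
    let mcq_part := pvMcqPart question_text
    let parts := PySem.Str.split₀ (PySem.Str.strip mcq_part)
    let st := parts.foldl pvStepA (PySem.Dict.empty, none, [])
    let options := pvFlushA st.1 st.2.1 st.2.2
    options.getD coded_answer coded_answer

-- ===== PORT B =====
-- inner while: collect value tokens up to the next key token, return (value, rest)
def pvGrabValue : List String → List String × List String
  | [] => ([], [])
  | u :: us =>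
    if pvIsKeyTok u then ([], u :: us)
    else
      let p := pvGrabValue us
      (u :: p.1, p.2)

theorem pvGrabValue_rest_length (ts : List String) : (pvGrabValue ts).2.length ≤ ts.length := by
  induction ts with
  | nil => simp [pvGrabValue]
  | cons u us ih =>
    by_cases h : pvIsKeyTok u = true
    · simp [pvGrabValue, h]
    · simp [pvGrabValue, h]; omega

-- outer while over tokens, threading result (last matching key wins)
def pvLoopB (coded : String) (tokens : List String) (result : String) : String :=
  match tokens with
  | [] => result
  | t :: ts =>
    if pvIsKeyTok t then
      let p := pvGrabValue ts
      pvLoopB coded p.2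
        (if pvFirstCharStr t == coded then PySem.Str.join " " p.1 else result)
    else
      pvLoopB coded ts result
termination_by tokens.length
decreasing_by
  · have := pvGrabValue_rest_length ts; simp; omega
  · simp

def decode_mcq_answer_alt (feature : String) (coded_answer : String) (questions_schema : List (String × String)) : String :=
  let question_text := pvQText feature questions_schema
  if PySem.Str.isIn "[MCQ:" question_text = false then
    coded_answer
  else
    let mcq_part := pvMcqPart question_text
    let tokens := PySem.Str.split₀ (PySem.Str.strip mcq_part)
    pvLoopB coded_answer tokens coded_answer

-- ===== PRECONDITION & SPEC =====
-- Pre_ excludes exactly the inputs where feature is not a key of questions_schema: Python A raises KeyError there (B too).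
def Pre_decode_mcq_answer (feature : String) (coded_answer : String) (questions_schema : List (String × String)) : Prop :=
  feature ∈ questions_schema.map Prod.fst
instance (feature : String) (coded_answer : String) (questions_schema : List (String × String)) : Decidable (Pre_decode_mcq_answer feature coded_answer questions_schema) := by unfold Pre_decode_mcq_answer; infer_instance

def pvWitness_decode_mcq_answer : String × String × (List (String × String)) :=
  ("gender", "A", [("gender", "Gender [MCQ: A. Female B. Male]")])

def Spec_decode_mcq_answer (feature : String) (coded_answer : String) (questions_schema : List (String × String)) (out : String) : Prop := out = decode_mcq_answer_alt feature coded_answer questions_schema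
instance (feature : String) (coded_answer : String) (questions_schema : List (String × String)) (out : String) : Decidable (Spec_decode_mcq_answer feature coded_answer questions_schema out) := by unfold Spec_decode_mcq_answer; infer_instance

-- ===== CLAIM (what is proved, stated in full; the proofs are below) =====
def Claim_equal_decode_mcq_answer : Prop := ∀ (feature : String) (coded_answer : String) (questions_schema : List (String × String)), Dom_decode_mcq_answer feature coded_answer questions_schema → Pre_decode_mcq_answer feature coded_answer questions_schema → Spec_decode_mcq_answer feature coded_answer questions_schema (decode_mcq_answer feature coded_answer questions_schema)

-- ===== LEMMAS AND PROOFS =====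

-- A's result from an arbitrary loop state
def pvRunA (coded : String) (tokens : List String) (d : PySem.Dict String String)
    (ck : Option String) (cv : List String) : String :=
  let st := tokens.foldl pvStepA (d, ck, cv)
  (pvFlushA st.1 st.2.1 st.2.2).getD coded coded

-- mid-segment: A from state (d, some k, cv) over ts equals finishing the segment at once
theorem pvRunA_some (coded : String) (ts : List String) (d : PySem.Dict String String)
    (k : String) (cv : List String) :
    pvRunA coded ts d (some k) cv =
      pvRunA coded (pvGrabValue ts).2
        (d.insert k (PySem.Str.join " " (cv ++ (pvGrabValue ts).1))) none [] := by
  induction ts generalizing d cv with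
  | nil => simp [pvGrabValue, pvRunA, pvFlushA]
  | cons u us ih =>
    by_cases h : pvIsKeyTok u = true
    · simp [pvGrabValue, h, pvRunA, List.foldl_cons, pvStepA, pvFlushA]
    · simp only [pvGrabValue, h, Bool.false_eq_true, if_false, pvRunA, List.foldl_cons,
        pvStepA, pvFlushA]
      have := ih d (cv ++ [u])
      simp only [pvRunA] at this
      simpa [List.append_assoc] using this

theorem pvRunA_eq_loopB (coded : String) :
    ∀ (n : Nat) (tokens : List String), tokens.length ≤ n →
      ∀ (d : PySem.Dict String String) (cv : List String),
        pvRunA coded tokens d none cv = pvLoopB coded tokens (d.getD coded coded) := by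
  intro n
  induction n with
  | zero =>
    intro tokens h d cv
    have : tokens = [] := List.length_eq_zero_iff.mp (Nat.le_zero.mp h)
    subst this
    simp [pvRunA, pvFlushA, pvLoopB]
  | succ n ih =>
    intro tokens h d cv
    match tokens with
    | [] => simp [pvRunA, pvFlushA, pvLoopB]
    | t :: ts =>
      by_cases hk : pvIsKeyTok t = true
      · have h1 : pvRunA coded (t :: ts) d none cv
            = pvRunA coded ts d (some (pvFirstCharStr t)) [] := by
          simp [pvRunA, List.foldl_cons, pvStepA, hk, pvFlushA]
        rw [h1, pvRunA_some]
        have hlen : (pvGrabValue ts).2.length ≤ n := by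
          have := pvGrabValue_rest_length ts
          simp at h; omega
        rw [ih _ hlen]
        rw [pvLoopB]
        simp only [hk, if_true]
        congr 1
        rw [PySem.Dict.getD_insert]
        by_cases he : pvFirstCharStr t == coded
        · simp [(beq_iff_eq.mp he).symm]
        · have : ¬ coded = pvFirstCharStr t := fun hc => by simp [hc] at he
          simp [he, this]
      · have h1 : pvRunA coded (t :: ts) d none cv
            = pvRunA coded ts d none (cv ++ [t]) := by
          simp [pvRunA, List.foldl_cons, pvStepA, hk]
        rw [h1, ih ts (by simp at h; omega)]
        rw [pvLoopB]
        simp [hk]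

theorem decode_mcq_answer_spec : Claim_equal_decode_mcq_answer := by
  unfold Claim_equal_decode_mcq_answer
  intro feature coded_answer questions_schema _ _
  unfold Spec_decode_mcq_answer decode_mcq_answer decode_mcq_answer_alt
  by_cases hg : PySem.Str.isIn "[MCQ:" (pvQText feature questions_schema) = false
  · rw [if_pos hg, if_pos hg]
  · rw [if_neg hg, if_neg hg]
    have := pvRunA_eq_loopB coded_answer
      (PySem.Str.split₀ (PySem.Str.strip (pvMcqPart (pvQText feature questions_schema)))).length
      (PySem.Str.split₀ (PySem.Str.strip (pvMcqPart (pvQText feature questions_schema))))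
      le_rfl PySem.Dict.empty []
    simp only [pvRunA] at this
    simpa [PySem.Dict.empty, PySem.Dict.getD, PySem.Dict.get?] using this
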